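-- pv_equiv track=rewrite | github.com/vllm-project/tpu-inference | tpu_inference/offload/tpu_offload_connector.py | _decompose_into_buckets
-- ===== SOURCE A (Python) =====
-- BLOCK_SIZE_BUCKETS = [1, 2, 4, 8, 16, 32, 64]
--
-- def _decompose_into_buckets(num_blocks: int) -> list[int]:
--     """
--     Decomposes a number into a sum of numbers from the BLOCK_SIZE_BUCKETS
--     list using a greedy approach.
--     """
--     sorted_buckets = sorted(BLOCK_SIZE_BUCKETS, reverse=True)
--     chunks = []
--     remaining = num_blocks
--     while remaining > 0:
--         for bucket_size in sorted_buckets: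
--             if remaining >= bucket_size:
--                 chunks.append(bucket_size)
--                 remaining -= bucket_size
--                 break
--         else:
--             # This should not happen if 1 is in the buckets
--             raise ValueError(
--                 "Could not decompose number with the given buckets.")
--     return chunks
-- ===== SOURCE B (Python) =====
-- BLOCK_SIZE_BUCKETS = [1, 2, 4, 8, 16, 32, 64]
--
-- def _decompose_into_buckets(num_blocks: int) -> list[int]:
--     """Direct arithmetic decomposition: q full 64-chunks, then the
--     remainder (< 64) decoded bit by bit in descending order."""
--     if num_blocks <= 0:
--         return []
--     q, r = divmod(num_blocks, 64)
--     chunks = [64] * q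
--     for b in (32, 16, 8, 4, 2, 1):
--         if r & b:
--             chunks.append(b)
--     return chunks
-- ===== Notes on version B (the rewrite author's own statement) =====
-- stated objective: simpler
-- what changed: Replaces the greedy while-loop with an inner per-chunk scan of the bucket list by a single divmod emitting the full-size chunks at once followed by a bitwise decode of the remainder; no nested loop remains.
import Mathlib
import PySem

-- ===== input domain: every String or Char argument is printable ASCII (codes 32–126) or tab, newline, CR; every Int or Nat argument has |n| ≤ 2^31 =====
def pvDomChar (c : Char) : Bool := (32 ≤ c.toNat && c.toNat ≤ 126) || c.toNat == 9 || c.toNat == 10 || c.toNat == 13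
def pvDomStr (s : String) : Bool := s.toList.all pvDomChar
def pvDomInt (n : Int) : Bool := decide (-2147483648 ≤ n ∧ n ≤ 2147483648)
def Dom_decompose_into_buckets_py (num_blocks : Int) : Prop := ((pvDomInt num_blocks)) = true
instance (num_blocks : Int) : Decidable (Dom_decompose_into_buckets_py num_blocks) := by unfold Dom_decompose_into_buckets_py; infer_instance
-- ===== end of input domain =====

-- B replaces A's greedy while-loop (inner 7-element scan per emitted chunk) by one divmod
-- and a 6-bit decode of the remainder; same return value, proved equal for every Int input.

-- ===== PORT A =====
-- inner `for bucket_size in sorted_buckets: if remaining >= bucket_size: … break` scan: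
-- first bucket ≤ remaining, none if the for-loop falls through (the `else: raise` branch).
def pyFindBucket : List Int → Int → Option Int
  | [], _ => none
  | b :: bs, r => if r ≥ b then some b else pyFindBucket bs r

-- the while-loop; fuel = remaining.toNat is enough, each iteration subtracts ≥ 1
-- (the `none` branch is Python's unreachable `raise`, never hit for remaining > 0).
def pyALoop : Nat → Int → List Int
  | 0, _ => []
  | fuel + 1, remaining =>
    if remaining > 0 then
      match pyFindBucket [64, 32, 16, 8, 4, 2, 1] remaining with
      | some b => b :: pyALoop fuel (remaining - b)
      | none => []
    else []

def decompose_into_buckets_py (num_blocks : Int) : List Int :=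
  pyALoop num_blocks.toNat num_blocks

-- ===== PORT B =====
def decompose_into_buckets_py_alt (num_blocks : Int) : List Int :=
  if num_blocks ≤ 0 then []
  else
    let q := PySem.Int.floordiv num_blocks 64
    let r := PySem.Int.mod num_blocks 64
    List.replicate q.toNat 64 ++ ([32, 16, 8, 4, 2, 1].filter (fun b => Int.land r b != 0))

-- ===== PRECONDITION & SPEC =====
def Spec_decompose_into_buckets_py (num_blocks : Int) (out : List Int) : Prop := out = decompose_into_buckets_py_alt num_blocks
instance (num_blocks : Int) (out : List Int) : Decidable (Spec_decompose_into_buckets_py num_blocks out) := by unfold Spec_decompose_into_buckets_py; infer_instance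

-- ===== CLAIM (what is proved, stated in full; the proofs are below) =====
def Claim_equal_decompose_into_buckets_py : Prop := ∀ (num_blocks : Int), Dom_decompose_into_buckets_py num_blocks → Spec_decompose_into_buckets_py num_blocks (decompose_into_buckets_py num_blocks)

-- ===== LEMMAS AND PROOFS =====

-- the inner scan only returns buckets b with 1 ≤ b ≤ r
lemma pick_bounds (r b : Int) (h : pyFindBucket [64, 32, 16, 8, 4, 2, 1] r = some b) :
    1 ≤ b ∧ b ≤ r := by
  simp only [pyFindBucket] at h
  split_ifs at h <;> simp_all <;> omega

-- n ≤ 0 stops the loop immediately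
lemma pyALoop_nonpos (fuel : Nat) (n : Int) (h : n ≤ 0) : pyALoop fuel n = [] := by
  cases fuel <;> simp [pyALoop] <;> omega

-- the fuel does not matter as long as it is ≥ n.toNat
lemma pyALoop_fuel (f : Nat) : ∀ (g : Nat) (n : Int), n.toNat ≤ f → n.toNat ≤ g →
    pyALoop f n = pyALoop g n := by
  induction f with
  | zero =>
    intro g n hf _
    have hn : n ≤ 0 := by omega
    rw [pyALoop_nonpos 0 n hn, pyALoop_nonpos g n hn]
  | succ f ih =>
    intro g n hf hg
    by_cases hn : n ≤ 0
    · rw [pyALoop_nonpos _ n hn, pyALoop_nonpos g n hn]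
    · push_neg at hn
      cases g with
      | zero => omega
      | succ g =>
        simp only [pyALoop, if_pos hn]
        cases hb : pyFindBucket [64, 32, 16, 8, 4, 2, 1] n with
        | none => rfl
        | some b =>
          obtain ⟨hb1, hb2⟩ := pick_bounds n b hb
          exact congrArg _ (ih g (n - b) (by omega) (by omega))

lemma pyALoop_step (f : Nat) (n : Int) (h : 64 ≤ n) :
    pyALoop (f + 1) n = 64 :: pyALoop f (n - 64) := by
  have hp : pyFindBucket [64, 32, 16, 8, 4, 2, 1] n = some 64 := by
    simp [pyFindBucket, h]
  simp [pyALoop, hp]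
  omega

-- the remainder decoder of B
def pvBits (r : Int) : List Int := [32, 16, 8, 4, 2, 1].filter (fun b => Int.land r b != 0)

-- closed form of B's body for n ≥ 0
def pvG (n : Int) : List Int :=
  List.replicate (PySem.Int.floordiv n 64).toNat 64 ++ pvBits (PySem.Int.mod n 64)

-- the loop on a remainder < 64 is exactly the bit decoder (finite check)
lemma small_cases : ∀ k : Nat, k < 64 → pyALoop k (k : Int) = pvBits (k : Int) := by
  decide

lemma floordiv_mod_64 (n : Int) (h : 0 ≤ n) :
    PySem.Int.floordiv n 64 = n / 64 ∧ PySem.Int.mod n 64 = n % 64 := by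
  exact ⟨PySem.Int.floordiv_eq_ediv_of_pos (by omega), PySem.Int.mod_eq_emod_of_pos (by omega)⟩

lemma A_eq_G : ∀ (m : Nat) (n : Int), 0 ≤ n → n.toNat = m → pyALoop m n = pvG n := by
  intro m
  induction m using Nat.strong_induction_on with
  | _ m ih =>
    intro n hn hm
    by_cases h64 : n < 64
    · -- small case: n = k < 64
      subst hm
      have hs := small_cases n.toNat (by omega)
      rw [Int.toNat_of_nonneg hn] at hs
      rw [hs]
      obtain ⟨hq, hr⟩ := floordiv_mod_64 n hn
      have hq0 : n / 64 = 0 := by omega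
      have hr0 : n % 64 = n := by omega
      simp [pvG, hq, hr, hq0, hr0]
    · -- n ≥ 64: one 64-step, then induction on n - 64
      push_neg at h64
      cases m with
      | zero => omega
      | succ m =>
        rw [pyALoop_step m n h64]
        have hfuel : pyALoop m (n - 64) = pyALoop (n - 64).toNat (n - 64) :=
          pyALoop_fuel m (n - 64).toNat (n - 64) (by omega) (by omega)
        rw [hfuel, ih (n - 64).toNat (by omega) (n - 64) (by omega) rfl]
        -- pvG n = 64 :: pvG (n - 64)
        obtain ⟨hq, hr⟩ := floordiv_mod_64 n (by omega)
        obtain ⟨hq', hr'⟩ := floordiv_mod_64 (n - 64) (by omega)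
        have hdiv : n / 64 = (n - 64) / 64 + 1 := by omega
        have hmod : n % 64 = (n - 64) % 64 := by omega
        have hpos : 0 ≤ (n - 64) / 64 := Int.ediv_nonneg (by omega) (by omega)
        simp only [pvG, hq, hr, hq', hr', hdiv, hmod]
        have : ((n - 64) / 64 + 1).toNat = ((n - 64) / 64).toNat + 1 := by omega
        rw [this, List.replicate_succ]
        rfl

-- ===== VERDICT (by name: the statement is the Claim_ definition above) =====
theorem decompose_into_buckets_py_spec : Claim_equal_decompose_into_buckets_py := by
  intro n _
  unfold Spec_decompose_into_buckets_py decompose_into_buckets_py decompose_into_buckets_py_alt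
  by_cases hn : n ≤ 0
  · rw [pyALoop_nonpos n.toNat n hn, if_pos hn]
  · push_neg at hn
    rw [if_neg (by omega), A_eq_G n.toNat n (by omega) rfl]
    rfl
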